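-- pv_equiv track=rewrite | github.com/FinixLei/WeChat_LandLords | Python/move_filter.py | filter_type_6_3_1
-- ===== SOURCE A (Python) =====
-- def filter_type_6_3_1(moves, rival_move):
--     rival_card_dict = dict()
--     target_rival_card = -1
--     for card in rival_move:
--         if card not in rival_card_dict:
--             rival_card_dict[card] = 1
--         else:
--             target_rival_card = card
--             break
--
--     new_moves = list()
--     for move in moves:
--         card_dict = dict()
--         for card in move:
--             if card not in card_dict:
--                 card_dict[card] = 1
--             else:
--                 if card > target_rival_card:
--                     new_moves.append(move)
--                     break
--
--     return new_moves
-- ===== SOURCE B (Python) =====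
-- def filter_type_6_3_1(moves, rival_move):
--     target_rival_card = -1
--     for i in range(len(rival_move)):
--         if rival_move[i] in rival_move[:i]:
--             target_rival_card = rival_move[i]
--             break
--
--     def has_high_pair(move):
--         s = sorted(move)
--         return any(a == b and a > target_rival_card for a, b in zip(s, s[1:]))
--
--     return [move for move in moves if has_high_pair(move)]
-- ===== Notes on version B (the rewrite author's own statement) =====
-- stated objective: alternative
-- what changed: The rival's repeated card is found by checking each card against the prefix before it instead of building a hash dict, each move is tested by sorting a copy and scanning adjacent equal pairs via any/zip instead of per-move hash duplicate detection, and the result is a list-comprehension filter instead of an append-accumulator loop.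
import Mathlib
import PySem

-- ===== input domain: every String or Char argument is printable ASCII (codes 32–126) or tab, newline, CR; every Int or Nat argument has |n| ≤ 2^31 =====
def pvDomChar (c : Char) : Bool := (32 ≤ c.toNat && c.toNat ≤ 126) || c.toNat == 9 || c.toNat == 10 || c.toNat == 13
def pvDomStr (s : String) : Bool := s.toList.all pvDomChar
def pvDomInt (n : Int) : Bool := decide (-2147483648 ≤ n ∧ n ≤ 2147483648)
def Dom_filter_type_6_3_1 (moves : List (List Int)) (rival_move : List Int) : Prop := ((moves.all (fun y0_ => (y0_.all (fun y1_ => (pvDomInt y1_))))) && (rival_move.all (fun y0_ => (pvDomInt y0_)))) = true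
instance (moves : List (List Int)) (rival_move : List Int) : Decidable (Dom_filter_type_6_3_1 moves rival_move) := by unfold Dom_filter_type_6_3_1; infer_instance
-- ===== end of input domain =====

-- B finds the rival's repeated card by prefix membership, tests each move by sorting a
-- copy and scanning adjacent equal pairs with any/zip, and filters by comprehension
-- instead of A's hash dicts and append-accumulator loop (alternative decomposition).

-- ===== PORT A =====
-- first loop: target_rival_card = first card already in rival_card_dict, else -1
def pvA_target (d : PySem.Dict Int Int) (l : List Int) : Int :=
  match l with
  | [] => -1
  | c :: rest => if d.contains c then c else pvA_target (d.insert c 1) rest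

-- inner loop over one move: append iff a repeated card > target is met
def pvA_hit (t : Int) (d : PySem.Dict Int Int) (l : List Int) : Bool :=
  match l with
  | [] => false
  | c :: rest =>
      if d.contains c then
        (if t < c then true else pvA_hit t d rest)
      else pvA_hit t (d.insert c 1) rest

def filter_type_6_3_1 (moves : List (List Int)) (rival_move : List Int) : List (List Int) :=
  let target := pvA_target PySem.Dict.empty rival_move
  moves.foldl (fun new_moves move =>
    if pvA_hit target PySem.Dict.empty move then new_moves ++ [move] else new_moves) []

-- ===== PORT B =====
-- 'rival_move[i] in rival_move[:i]' scan; pre is the already-seen prefix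
def pvB_first_dup (pre : List Int) (l : List Int) : Int :=
  match l with
  | [] => -1
  | c :: rest => if pre.contains c then c else pvB_first_dup (pre ++ [c]) rest

-- any(a == b and a > target for a, b in zip(s, s[1:])) on the sorted copy
def pvB_high_pair (t : Int) (move : List Int) : Bool :=
  let s := PySem.List.sorted move (fun x => x) false
  (s.zip s.tail).any (fun p => p.1 == p.2 && t < p.1)

def filter_type_6_3_1_alt (moves : List (List Int)) (rival_move : List Int) : List (List Int) :=
  let target := pvB_first_dup [] rival_move
  moves.filter (fun move => pvB_high_pair target move)

-- ===== PRECONDITION & SPEC =====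
def Spec_filter_type_6_3_1 (moves : List (List Int)) (rival_move : List Int) (out : List (List Int)) : Prop := out = filter_type_6_3_1_alt moves rival_move
instance (moves : List (List Int)) (rival_move : List Int) (out : List (List Int)) : Decidable (Spec_filter_type_6_3_1 moves rival_move out) := by unfold Spec_filter_type_6_3_1; infer_instance

-- ===== CLAIM (what is proved, stated in full; the proofs are below) =====
def Claim_equal_filter_type_6_3_1 : Prop := ∀ (moves : List (List Int)) (rival_move : List Int), Dom_filter_type_6_3_1 moves rival_move → Spec_filter_type_6_3_1 moves rival_move (filter_type_6_3_1 moves rival_move)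

-- ===== LEMMAS AND PROOFS =====

-- the two target scans agree when the dict's keys and the prefix have the same members
theorem pv_target_eq (l : List Int) : ∀ (d : PySem.Dict Int Int) (pre : List Int),
    (∀ c : Int, d.contains c = true ↔ c ∈ pre) → pvA_target d l = pvB_first_dup pre l := by
  induction l with
  | nil => intro d pre _; rfl
  | cons c rest ih =>
      intro d pre h
      simp only [pvA_target, pvB_first_dup]
      by_cases hc : c ∈ pre
      · rw [if_pos ((h c).mpr hc), if_pos (by simpa using hc)]
      · rw [if_neg (fun hx => hc ((h c).mp hx)), if_neg (by simpa using hc)]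
        apply ih
        intro x
        rw [PySem.Dict.contains_insert, List.mem_append, List.mem_singleton]
        constructor
        · intro hx
          rcases Bool.or_eq_true_iff.mp hx with hx | hx
          · exact Or.inr (by exact_mod_cast (beq_iff_eq).mp hx)
          · exact Or.inl ((h x).mp hx)
        · intro hx
          rcases hx with hx | hx
          · exact Bool.or_eq_true_iff.mpr (Or.inr ((h x).mpr hx))
          · exact Bool.or_eq_true_iff.mpr (Or.inl (beq_iff_eq.mpr hx))

theorem pv_count_cons_ne {v c : Int} (h : v ≠ c) (l : List Int) :
    (c :: l).count v = l.count v := by simp [Ne.symm h]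

-- characterisation of A's inner loop
theorem pvA_hit_iff (t : Int) (l : List Int) : ∀ (d : PySem.Dict Int Int),
    pvA_hit t d l = true ↔ ∃ v : Int, t < v ∧ ((d.contains v = true ∧ v ∈ l) ∨ 2 ≤ l.count v) := by
  induction l with
  | nil =>
      intro d
      simp [pvA_hit]
  | cons c rest ih =>
      intro d
      simp only [pvA_hit]
      by_cases hc : d.contains c = true
      · rw [if_pos hc]
        by_cases ht : t < c
        · simp only [if_pos ht, true_iff]
          exact ⟨c, ht, Or.inl ⟨hc, List.mem_cons_self⟩⟩
        · rw [if_neg ht, ih d]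
          constructor
          · rintro ⟨v, hv, hcase⟩
            rcases hcase with ⟨h1, h2⟩ | h2
            · exact ⟨v, hv, Or.inl ⟨h1, List.mem_cons_of_mem _ h2⟩⟩
            · refine ⟨v, hv, Or.inr ?_⟩
              rw [List.count_cons]; omega
          · rintro ⟨v, hv, hcase⟩
            have hne : v ≠ c := fun he => ht (he ▸ hv)
            rcases hcase with ⟨h1, h2⟩ | h2
            · exact ⟨v, hv, Or.inl ⟨h1, (List.mem_cons.mp h2).resolve_left hne⟩⟩
            · exact ⟨v, hv, Or.inr (by rwa [pv_count_cons_ne hne] at h2)⟩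
      · rw [if_neg hc, ih (d.insert c 1)]
        constructor
        · rintro ⟨v, hv, hcase⟩
          rcases hcase with ⟨h1, h2⟩ | h2
          · rw [PySem.Dict.contains_insert] at h1
            rcases Bool.or_eq_true_iff.mp h1 with h1 | h1
            · have hvc : v = c := by exact_mod_cast beq_iff_eq.mp h1
              subst hvc
              refine ⟨v, hv, Or.inr ?_⟩
              have : 1 ≤ rest.count v := List.one_le_count_iff.mpr h2
              rw [List.count_cons_self]; omega
            · exact ⟨v, hv, Or.inl ⟨h1, List.mem_cons_of_mem _ h2⟩⟩
          · by_cases hvc : v = c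
            · subst hvc
              refine ⟨v, hv, Or.inr ?_⟩
              rw [List.count_cons_self]; omega
            · exact ⟨v, hv, Or.inr (by rwa [pv_count_cons_ne hvc])⟩
        · rintro ⟨v, hv, hcase⟩
          by_cases hvc : v = c
          · subst hvc
            rcases hcase with ⟨h1, _⟩ | h2
            · exact absurd h1 (by simp [hc])
            · rw [List.count_cons_self] at h2
              have hm : v ∈ rest := List.one_le_count_iff.mp (by omega)
              exact ⟨v, hv, Or.inl ⟨by simp, hm⟩⟩
          · rcases hcase with ⟨h1, h2⟩ | h2
            · refine ⟨v, hv, Or.inl ⟨?_, (List.mem_cons.mp h2).resolve_left hvc⟩⟩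
              rw [PySem.Dict.contains_insert]
              exact Bool.or_eq_true_iff.mpr (Or.inr h1)
            · rw [pv_count_cons_ne hvc] at h2
              exact ⟨v, hv, Or.inr h2⟩

-- characterisation of B's any/zip adjacent-pair scan on a sorted list
theorem pvB_zip_iff (t : Int) (l : List Int) (hs : l.Pairwise (· ≤ ·)) :
    (l.zip l.tail).any (fun p => p.1 == p.2 && t < p.1) = true ↔
      ∃ v : Int, t < v ∧ 2 ≤ l.count v := by
  induction l with
  | nil => simp
  | cons a rest ih =>
      match rest, hs with
      | [], _ =>
          simp only [List.tail_cons, List.zip_nil_right, List.any_nil, Bool.false_eq_true,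
            false_iff]
          rintro ⟨v, _, hcnt⟩
          by_cases hva : v = a
          · subst hva; rw [List.count_cons_self, List.count_nil] at hcnt; omega
          · rw [pv_count_cons_ne hva, List.count_nil] at hcnt; omega
      | b :: r, hs =>
          have hab : a ≤ b := (List.pairwise_cons.mp hs).1 b List.mem_cons_self
          have htail := (List.pairwise_cons.mp hs).2
          simp only [List.tail_cons, List.zip_cons_cons, List.any_cons]
          by_cases hhit : a = b ∧ t < a
          · rw [Bool.or_eq_true_iff]
            constructor
            · intro _
              refine ⟨a, hhit.2, ?_⟩
              rw [List.count_cons_self, ← hhit.1, List.count_cons_self]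
              omega
            · intro _
              exact Or.inl (by obtain ⟨h1, h2⟩ := hhit; subst h1; simp [h2])
          · have hfalse : (a == b && decide (t < a)) = false := by
              simp only [Bool.and_eq_false_iff, beq_eq_false_iff_ne, ne_eq,
                decide_eq_false_iff_not]
              by_cases h1 : a = b
              · exact Or.inr (fun h2 => hhit ⟨h1, h2⟩)
              · exact Or.inl h1
            have ih' := ih htail
            simp only [List.tail_cons] at ih'
            rw [hfalse, Bool.false_or, ih']
            constructor
            · rintro ⟨v, hv, hcnt⟩
              refine ⟨v, hv, ?_⟩
              rw [List.count_cons]; omega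
            · rintro ⟨v, hv, hcnt⟩
              by_cases hva : v = a
              · subst hva
                rw [List.count_cons_self] at hcnt
                have hmem : v ∈ b :: r := List.one_le_count_iff.mp (by omega)
                have hvb : b = v := by
                  rcases List.mem_cons.mp hmem with h | h
                  · exact h.symm
                  · exact le_antisymm ((List.pairwise_cons.mp htail).1 v h) hab
                exact absurd ⟨hvb.symm, hv⟩ hhit
              · exact ⟨v, hv, by rwa [pv_count_cons_ne hva] at hcnt⟩

-- per-move decisions agree
theorem pv_hit_eq_high_pair (t : Int) (m : List Int) :
    pvA_hit t PySem.Dict.empty m = pvB_high_pair t m := by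
  have hperm : (PySem.List.sorted m (fun x => x) false).Perm m := PySem.List.sorted_perm m _ false
  have hpw : (PySem.List.sorted m (fun x => x) false).Pairwise (· ≤ ·) :=
    PySem.List.sorted_pairwise m (fun x => x)
  rw [Bool.eq_iff_iff, pvA_hit_iff, pvB_high_pair, pvB_zip_iff t _ hpw]
  constructor
  · rintro ⟨v, hv, hcase⟩
    rcases hcase with ⟨h1, _⟩ | h2
    · exact absurd h1 (by simp [PySem.Dict.contains_empty])
    · exact ⟨v, hv, by rwa [hperm.count_eq]⟩
  · rintro ⟨v, hv, hcnt⟩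
    exact ⟨v, hv, Or.inr (by rwa [hperm.count_eq] at hcnt)⟩

-- ===== VERDICT (by name: the statement is the Claim_ definition above) =====
theorem filter_type_6_3_1_spec : Claim_equal_filter_type_6_3_1 := by
  intro moves rival_move _
  unfold Spec_filter_type_6_3_1 filter_type_6_3_1 filter_type_6_3_1_alt
  have htgt : pvA_target PySem.Dict.empty rival_move = pvB_first_dup [] rival_move := by
    apply pv_target_eq
    intro c
    simp [PySem.Dict.contains_empty]
  simp only [htgt, pv_hit_eq_high_pair]
  rw [PySem.List.foldl_append_if_eq_filter]
  simp
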